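-- pv_equiv track=rewrite | github.com/cracosta37/project_hangman | hangman/services/word_repository.py | _validate_and_clean_entry
-- ===== SOURCE A (Python) =====
-- from typing import Dict, List, Set, Union
--
-- def _validate_and_clean_entry(raw: object) -> Union[str, None]:
--     """
--     Validate and return a cleaned string or None if invalid.
--
--     Rules:
--     - Must be a str.
--     - Trim leading/trailing whitespace.
--     - Must contain only letters, spaces or hyphens.
--     - Must contain at least two alphabetic letters.
--     - Must be shorter than a reasonable cap (e.g., 120 chars).
--     """
--
--     if not isinstance(raw, str):
--         return None
--
--     text = raw.strip()
--     if not text: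
--         return None
--
--     # Length cap (prevents abusive entries)
--     if len(text) > 120:
--         return None
--
--     # Validate allowed characters (letters incl. international, spaces, hyphens)
--     # We'll check each character category using unicode classification.
--     alpha_count = 0
--     for ch in text:
--         if ch.isalpha():
--             alpha_count += 1
--             continue
--         if ch == " " or ch == "-":
--             continue
--         # any other character (punctuation, digits, symbols) -> invalid
--         return None
--
--     if alpha_count < 2:
--         # must contain at least two letters
--         return None
--
--     # At this stage the entry is syntactically acceptable.
--     # Return the original (trimmed) text (controller/model will perform additional normalization).
--     return text
-- ===== SOURCE B (Python) =====
-- def _validate_and_clean_entry(raw):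
--     if not isinstance(raw, str):
--         return None
--     text = raw.strip()
--     if not text or len(text) > 120:
--         return None
--     # tokenize on the allowed separators; every token must be empty or purely alphabetic,
--     # and the tokens together must carry at least two letters
--     parts = [p for chunk in text.split(' ') for p in chunk.split('-')]
--     if all(p == '' or p.isalpha() for p in parts) and sum(map(len, parts)) >= 2:
--         return text
--     return None
-- ===== Notes on version B (the rewrite author's own statement) =====
-- stated objective: alternative
-- what changed: Replaces A's per-character classification loop (alpha counter with early returns) by tokenizing the trimmed text on the space and hyphen separator characters and validating the token list: every token must be empty or purely alphabetic and the tokens' total length must be at least 2.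
import Mathlib
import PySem

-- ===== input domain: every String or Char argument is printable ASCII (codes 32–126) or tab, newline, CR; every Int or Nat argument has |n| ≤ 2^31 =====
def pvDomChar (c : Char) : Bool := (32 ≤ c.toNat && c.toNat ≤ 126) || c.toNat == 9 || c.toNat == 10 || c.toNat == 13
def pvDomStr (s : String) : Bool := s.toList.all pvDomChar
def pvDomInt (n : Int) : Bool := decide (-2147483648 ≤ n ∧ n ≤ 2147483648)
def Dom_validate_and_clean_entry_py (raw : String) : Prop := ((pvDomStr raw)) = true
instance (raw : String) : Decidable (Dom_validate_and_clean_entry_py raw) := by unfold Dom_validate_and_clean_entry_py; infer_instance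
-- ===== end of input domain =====

-- B replaces A's per-character classification loop (alpha counter + early returns) by tokenizing
-- the trimmed text on the space and hyphen separators and validating the token list (each token empty or all-alpha,
-- total token length ≥ 2); alternative decomposition, not faster.


-- ===== PORT A =====
-- A's per-character loop: count letters, skip ' '/'-', early-return on anything else
def goA : List Char → Int → Option Int
  | [], acc => some acc
  | c :: rest, acc =>
    if PySem.Chars.isalpha c then goA rest (acc + 1)
    else if c == ' ' || c == '-' then goA rest acc
    else none

def validate_and_clean_entry_py (raw : String) : Option String :=
  let text := PySem.Str.strip raw
  if text.toList = [] then none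
  else if 120 < text.toList.length then none
  else
    match goA text.toList 0 with
    | none => none
    | some n => if n < 2 then none else some text

-- ===== PORT B =====
-- tokenize on space then on hyphen (Python: [p for chunk in text.split(' ') for p in chunk.split('-')]),
-- then validate the token list in bulk
def validate_and_clean_entry_py_alt (raw : String) : Option String :=
  let text := PySem.Str.strip raw
  if text.toList = [] ∨ 120 < text.toList.length then none
  else
    let parts := (PySem.Chars.splitOn text.toList [' ']).flatMap
                   (fun chunk => PySem.Chars.splitOn chunk ['-'])
    if parts.all (fun p => p.isEmpty || PySem.Chars.strIsalpha p)
         && decide (2 ≤ (parts.map List.length).sum)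
    then some text else none

-- ===== PRECONDITION & SPEC =====
def Spec_validate_and_clean_entry_py (raw : String) (out : Option String) : Prop := out = validate_and_clean_entry_py_alt raw
instance (raw : String) (out : Option String) : Decidable (Spec_validate_and_clean_entry_py raw out) := by unfold Spec_validate_and_clean_entry_py; infer_instance

-- ===== CLAIM (what is proved, stated in full; the proofs are below) =====
def Claim_equal_validate_and_clean_entry_py : Prop := ∀ (raw : String), Dom_validate_and_clean_entry_py raw → Spec_validate_and_clean_entry_py raw (validate_and_clean_entry_py raw)

-- ===== LEMMAS AND PROOFS =====

-- proof-only: apply f to the first entry of a list of lists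
def mapHead (f : List Char → List Char) : List (List Char) → List (List Char)
  | [] => []
  | t :: ts => f t :: ts

-- proof-only: reference single-character splitter (no fuel, no accumulators)
def splitCharSpec (s : Char) : List Char → List (List Char)
  | [] => [[]]
  | c :: cs => if c = s then [] :: splitCharSpec s cs else mapHead (c :: ·) (splitCharSpec s cs)

lemma splitCharSpec_ne_nil (s : Char) (l : List Char) : splitCharSpec s l ≠ [] := by
  cases l with
  | nil => simp [splitCharSpec]
  | cons c cs =>
    simp only [splitCharSpec]
    split
    · simp
    · cases h : splitCharSpec s cs with
      | nil => exact absurd h (splitCharSpec_ne_nil s cs)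
      | cons t ts => simp [mapHead]

lemma mapHead_id (ts : List (List Char)) : mapHead (fun t => t) ts = ts := by
  cases ts <;> simp [mapHead]

lemma mapHead_comp (f g : List Char → List Char) (ts : List (List Char)) :
    mapHead f (mapHead g ts) = mapHead (fun t => f (g t)) ts := by
  cases ts <;> simp [mapHead]

lemma splitOn_go_single (s : Char) :
    ∀ (l : List Char) (fuel : Nat) (cur : List Char) (acc : List (List Char)),
      l.length < fuel →
      PySem.Chars.splitOn.go [s] fuel l cur acc
        = acc.reverse ++ mapHead (cur.reverse ++ ·) (splitCharSpec s l) := by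
  intro l
  induction l with
  | nil =>
    intro fuel cur acc h
    match fuel with
    | f + 1 => simp [PySem.Chars.splitOn.go, splitCharSpec, mapHead]
  | cons c rest ih =>
    intro fuel cur acc h
    match fuel with
    | f + 1 =>
      have hf : rest.length < f := by simpa using h
      by_cases hc : c = s
      · subst hc
        have hpre : List.isPrefixOf [c] (c :: rest) = true := by
          simp [List.isPrefixOf]
        simp only [PySem.Chars.splitOn.go, hpre, if_pos]
        rw [show List.drop (List.length [c]) (c :: rest) = rest from by simp]
        rw [ih f [] (cur.reverse :: acc) hf]
        simp [splitCharSpec, mapHead]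
        cases hsp : splitCharSpec c rest with
        | nil => exact absurd hsp (splitCharSpec_ne_nil c rest)
        | cons t ts => simp
      · have hpre : List.isPrefixOf [s] (c :: rest) = false := by
          simp only [List.isPrefixOf, Bool.and_eq_false_iff]
          left
          simpa using fun h' => absurd h'.symm hc
        simp only [PySem.Chars.splitOn.go]
        rw [if_neg (by simp [hpre])]
        rw [ih f (c :: cur) acc hf]
        simp only [splitCharSpec, if_neg hc, List.reverse_cons, mapHead_comp]
        congr 1
        cases hsp : splitCharSpec s rest with
        | nil => exact absurd hsp (splitCharSpec_ne_nil s rest)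
        | cons t ts => simp [mapHead]

lemma splitOn_single (s : Char) (l : List Char) :
    PySem.Chars.splitOn l [s] = splitCharSpec s l := by
  unfold PySem.Chars.splitOn
  rw [splitOn_go_single s l (l.length + 1) [] [] (by omega)]
  simpa using mapHead_id (splitCharSpec s l)

lemma flatten_splitCharSpec (s : Char) (l : List Char) :
    (splitCharSpec s l).flatten = l.filter (fun c => !(c == s)) := by
  induction l with
  | nil => simp [splitCharSpec]
  | cons c cs ih =>
    simp only [splitCharSpec]
    by_cases hc : c = s
    · subst hc
      rw [if_pos rfl]
      simp only [List.flatten_cons, List.nil_append, List.filter_cons]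
      simpa using ih
    · rw [if_neg hc]
      cases hsp : splitCharSpec s cs with
      | nil => exact absurd hsp (splitCharSpec_ne_nil s cs)
      | cons t ts =>
        rw [hsp] at ih
        simp only [mapHead, List.flatten_cons, List.filter_cons]
        rw [if_pos (by simpa using hc)]
        simp only [← ih, List.flatten_cons, List.cons_append]

lemma all_flatten (p : Char → Bool) (L : List (List Char)) :
    (L.all fun t => t.all p) = L.flatten.all p := by
  induction L with
  | nil => rfl
  | cons t ts ih => rw [List.all_cons, ih, List.flatten_cons, List.all_append]

lemma token_pred (p : List Char) :
    (p.isEmpty || PySem.Chars.strIsalpha p) = p.all PySem.Chars.isalpha := by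
  cases p with
  | nil => simp
  | cons c cs => simp [PySem.Chars.strIsalpha]

-- characterization of A's loop by the separator-free residue
lemma goA_eq (cs : List Char) (a : Int) :
    goA cs a =
      if (cs.filter (fun c => !(c == ' ' || c == '-'))).all PySem.Chars.isalpha
      then some (a + ((cs.filter (fun c => !(c == ' ' || c == '-'))).length : Int))
      else none := by
  induction cs generalizing a with
  | nil => simp [goA]
  | cons c cs ih =>
    rcases eq_or_ne c ' ' with rfl | hne1
    · simpa [goA, List.filter_cons, show PySem.Chars.isalpha ' ' = false from by decide] using ih a
    rcases eq_or_ne c '-' with rfl | hne2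
    · simpa [goA, List.filter_cons, show PySem.Chars.isalpha '-' = false from by decide] using ih a
    by_cases hα : PySem.Chars.isalpha c = true
    · simp [goA, hα, hne1, hne2, ih]
      split_ifs <;> first | rfl | (congr 1; omega)
    · have hα' : PySem.Chars.isalpha c = false := by simpa using hα
      simp [goA, hα', hne1, hne2]

-- B's token flatten is exactly A's separator-free residue
lemma parts_flatten (l : List Char) :
    ((PySem.Chars.splitOn l [' ']).flatMap (fun chunk => PySem.Chars.splitOn chunk ['-'])).flatten
      = l.filter (fun c => !(c == ' ' || c == '-')) := by
  rw [splitOn_single]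
  have h1 : ∀ ts : List (List Char),
      (ts.flatMap (fun chunk => PySem.Chars.splitOn chunk ['-'])).flatten
        = ts.flatten.filter (fun c => !(c == '-')) := by
    intro ts
    induction ts with
    | nil => rfl
    | cons t ts ih =>
      simp only [List.flatMap_cons, List.flatten_append, List.flatten_cons, List.filter_append, ← ih]
      rw [splitOn_single, flatten_splitCharSpec]
  rw [h1, flatten_splitCharSpec, List.filter_filter]
  congr 1
  funext c
  by_cases hA : c = '-' <;> by_cases hB : c = ' ' <;> simp [hA, hB, Bool.and_comm]

-- B reduced to the filtered-residue form
set_option maxHeartbeats 1600000 in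
lemma alt_eq (raw : String) :
    validate_and_clean_entry_py_alt raw =
      (let text := PySem.Str.strip raw
       if text.toList = [] ∨ 120 < text.toList.length then none
       else
         let s := text.toList.filter (fun c => !(c == ' ' || c == '-'))
         if s.all PySem.Chars.isalpha && decide (2 ≤ s.length) then some text else none) := by
  unfold validate_and_clean_entry_py_alt
  simp only
  split
  · rfl
  · have e1 : ((PySem.Chars.splitOn (PySem.Str.strip raw).toList [' ']).flatMap
          (fun chunk => PySem.Chars.splitOn chunk ['-'])).all
            (fun p => p.isEmpty || PySem.Chars.strIsalpha p)
        = ((PySem.Str.strip raw).toList.filter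
            (fun c => !(c == ' ' || c == '-'))).all PySem.Chars.isalpha := by
      simp only [token_pred]
      rw [all_flatten, parts_flatten]
    have e2 : (((PySem.Chars.splitOn (PySem.Str.strip raw).toList [' ']).flatMap
          (fun chunk => PySem.Chars.splitOn chunk ['-'])).map List.length).sum
        = ((PySem.Str.strip raw).toList.filter
            (fun c => !(c == ' ' || c == '-'))).length := by
      rw [← List.length_flatten, parts_flatten]
    rw [e1, e2]

-- ===== VERDICT (by name: the statement is the Claim_ definition above) =====
set_option maxHeartbeats 1600000 in
theorem validate_and_clean_entry_py_spec : Claim_equal_validate_and_clean_entry_py := by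
  unfold Claim_equal_validate_and_clean_entry_py
  intro raw _
  unfold Spec_validate_and_clean_entry_py validate_and_clean_entry_py
  rw [alt_eq]
  set text := PySem.Str.strip raw with htext
  by_cases h0 : text.toList = []
  · simp [h0]
  · by_cases h1 : 120 < text.toList.length
    · have h1' : 120 < text.length := by simpa using h1
      simp [h0, h1']
    · have h1' : ¬ 120 < text.length := by simpa using h1
      by_cases hall : (text.toList.filter (fun c => !(c == ' ' || c == '-'))).all PySem.Chars.isalpha = true
      · have hallP : ∀ x ∈ text.toList, (x = ' ' ∨ x = '-') ∨ PySem.Chars.isalpha x = true := by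
          simpa using hall
        by_cases hlen : 2 ≤ (text.toList.filter (fun c => !(c == ' ' || c == '-'))).length
        · have hlen' : 2 ≤ (text.toList.filter (fun c => !(c == ' ') && !(c == '-'))).length := by
            simpa using hlen
          simp [goA_eq, h0, h1', hlen']
          rw [if_pos hallP, if_pos hallP]
          simp
          omega
        · have hlen' : ¬ 2 ≤ (text.toList.filter (fun c => !(c == ' ') && !(c == '-'))).length := by
            simpa using hlen
          simp [goA_eq, h0, h1', hlen']
          rw [if_pos hallP]
          simp
          omega
      · have hallF : ¬ ∀ x ∈ text.toList, (x = ' ' ∨ x = '-') ∨ PySem.Chars.isalpha x = true := by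
          simpa using hall
        simp [goA_eq, h0, h1', hallF]
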